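-- pv_equiv track=rewrite | github.com/sarahmaga/Aeds2 | TP/TP1_py/TP01Q06 - Is/main.py | isJustConso
-- ===== SOURCE A (Python) =====
-- def isJustConso(s: str):
--     s.lower()
--     resp = True
--
--     if 'a' in s or 'e' in s or 'i' in s or 'o' in s or 'u' in s:
--         resp = False
--
--     for i in s:
--         if (i >= chr(48) and i <= chr(57) or i == '.' or i == ',') == True:
--             resp = False
--
--     return resp
-- ===== SOURCE B (Python) =====
-- FORBIDDEN = frozenset("aeiou0123456789.,")
--
-- def isJustConso(s: str):
--     return not any(c in FORBIDDEN for c in s)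
-- ===== Notes on version B (the rewrite author's own statement) =====
-- stated objective: simpler
-- what changed: Replaces A's five substring scans plus a digit/punctuation loop (no early exit) with one short-circuiting pass over the string against a single precomputed forbidden-character set.
import Mathlib
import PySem

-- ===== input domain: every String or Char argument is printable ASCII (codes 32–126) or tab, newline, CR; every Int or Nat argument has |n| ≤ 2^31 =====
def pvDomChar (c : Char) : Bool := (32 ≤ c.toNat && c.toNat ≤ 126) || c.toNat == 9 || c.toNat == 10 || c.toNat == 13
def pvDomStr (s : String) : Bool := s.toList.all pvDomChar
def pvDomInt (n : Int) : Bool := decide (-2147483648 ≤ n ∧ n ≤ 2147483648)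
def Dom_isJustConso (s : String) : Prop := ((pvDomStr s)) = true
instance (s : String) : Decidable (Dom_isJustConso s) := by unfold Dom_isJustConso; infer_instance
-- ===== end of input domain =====

-- B replaces A's five substring scans plus a digit/punctuation loop with one
-- pass over the string against a single forbidden-character set (objective: simpler).
-- ===== PORT A =====
def isJustConso (s : String) : Bool :=
  -- `s.lower()` is computed and discarded, exactly as in A
  let _ := PySem.Str.lower s
  let resp := true
  let resp := if PySem.Str.isIn "a" s || PySem.Str.isIn "e" s || PySem.Str.isIn "i" s ||
      PySem.Str.isIn "o" s || PySem.Str.isIn "u" s then false else resp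
  s.toList.foldl (fun resp i =>
    if ((Char.ofNat 48 ≤ i && i ≤ Char.ofNat 57) || i == '.' || i == ',') == true then false
    else resp) resp

-- ===== PORT B =====
-- frozenset("aeiou0123456789.,"): the 17 distinct characters, used for membership only
def forbiddenChars : List Char :=
  ['a','e','i','o','u','0','1','2','3','4','5','6','7','8','9','.',',']

def isJustConso_alt (s : String) : Bool :=
  !(s.toList.any (fun c => forbiddenChars.contains c))

-- ===== PRECONDITION & SPEC =====
def Spec_isJustConso (s : String) (out : Bool) : Prop := out = isJustConso_alt s
instance (s : String) (out : Bool) : Decidable (Spec_isJustConso s out) := by unfold Spec_isJustConso; infer_instance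

-- ===== CLAIM (what is proved, stated in full; the proofs are below) =====
def Claim_equal_isJustConso : Prop := ∀ (s : String), Dom_isJustConso s → Spec_isJustConso s (isJustConso s)

-- ===== LEMMAS AND PROOFS =====
lemma isIn_single_iff (a : Char) (s : String) :
    PySem.Str.isIn (String.ofList [a]) s = s.toList.any (· == a) := by
  rcases h : s.toList.any (· == a) with _ | _
  · rw [Bool.eq_false_iff]
    intro hin
    rw [PySem.Str.isIn_iff_infix, String.toList_ofList, List.singleton_infix_iff] at hin
    rw [List.any_eq_false] at h
    have := h a hin
    simp at this
  · rw [PySem.Str.isIn_iff_infix, String.toList_ofList, List.singleton_infix_iff]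
    rw [List.any_eq_true] at h
    obtain ⟨x, hx, he⟩ := h
    rw [beq_iff_eq] at he
    exact he ▸ hx

lemma foldl_resp (p : Char → Bool) (l : List Char) (r : Bool) :
    l.foldl (fun resp i => if p i then false else resp) r = (r && !(l.any p)) := by
  induction l generalizing r with
  | nil => simp
  | cons a t ih =>
    simp only [List.foldl_cons, List.any_cons, ih]
    by_cases h : p a = true <;> simp [h]

lemma pointwise (c : Char) :
    ((c == 'a' || c == 'e' || c == 'i' || c == 'o' || c == 'u') ||
      ((Char.ofNat 48 ≤ c && c ≤ Char.ofNat 57) || c == '.' || c == ',')) =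
    forbiddenChars.contains c := by
  rw [Bool.eq_iff_iff]
  have hof48 : (Char.ofNat 48).val.toNat = 48 := rfl
  have hof57 : (Char.ofNat 57).val.toNat = 57 := rfl
  have hc97 : ('a' : Char).val.toNat = 97 := rfl
  have hc101 : ('e' : Char).val.toNat = 101 := rfl
  have hc105 : ('i' : Char).val.toNat = 105 := rfl
  have hc111 : ('o' : Char).val.toNat = 111 := rfl
  have hc117 : ('u' : Char).val.toNat = 117 := rfl
  have hc49 : ('1' : Char).val.toNat = 49 := rfl
  have hc50 : ('2' : Char).val.toNat = 50 := rfl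
  have hc51 : ('3' : Char).val.toNat = 51 := rfl
  have hc52 : ('4' : Char).val.toNat = 52 := rfl
  have hc53 : ('5' : Char).val.toNat = 53 := rfl
  have hc54 : ('6' : Char).val.toNat = 54 := rfl
  have hc55 : ('7' : Char).val.toNat = 55 := rfl
  have hc56 : ('8' : Char).val.toNat = 56 := rfl
  have hc46 : ('.' : Char).val.toNat = 46 := rfl
  have hc44 : (',' : Char).val.toNat = 44 := rfl
  simp only [forbiddenChars, List.contains_cons, List.contains_nil, Bool.or_eq_true,
    Bool.and_eq_true, beq_iff_eq, decide_eq_true_eq, Char.le_def, UInt32.le_iff_toNat_le,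
    Bool.false_eq_true, or_false, Char.ext_iff, ← UInt32.toNat_inj, hof48, hof57,
    hc97, hc101, hc105, hc111, hc117, hc49, hc50, hc51, hc52, hc53, hc54, hc55, hc56, hc46, hc44]
  omega

lemma any_or (l : List Char) (p q : Char → Bool) :
    (l.any p || l.any q) = l.any (fun c => p c || q c) := by
  induction l with
  | nil => simp
  | cons a t ih =>
    simp only [List.any_cons, ← ih]
    by_cases hp : p a = true <;> by_cases hq : q a = true <;> simp [hp, hq]

-- ===== VERDICT (by name: the statement is the Claim_ definition above) =====
theorem isJustConso_spec : Claim_equal_isJustConso := by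
  intro s _
  unfold Spec_isJustConso isJustConso isJustConso_alt
  simp only
  rw [show ("a" : String) = String.ofList ['a'] from rfl,
      show ("e" : String) = String.ofList ['e'] from rfl,
      show ("i" : String) = String.ofList ['i'] from rfl,
      show ("o" : String) = String.ofList ['o'] from rfl,
      show ("u" : String) = String.ofList ['u'] from rfl]
  have hbt : ∀ b : Bool, (b == true) = b := by decide
  simp only [isIn_single_iff, foldl_resp, hbt]
  rw [show ∀ b : Bool, (if b = true then false else true) = !b from by decide]
  rw [← Bool.not_or]
  simp only [any_or]
  congr 2
  funext c
  exact pointwise c
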